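-- pv_equiv track=rewrite | github.com/gidabrams23/COT_Freight_Optimization_Tool | services/order_categories.py | order_category_scope_from_tokens
-- ===== SOURCE A (Python) =====
-- ORDER_CATEGORY_SCOPE_UTILITIES = "utilities"
--
-- ORDER_CATEGORY_SCOPE_DUMP = "dump"
--
-- ORDER_CATEGORY_SCOPE_CARGO = "cargo"
--
-- ORDER_CATEGORY_SCOPE_OTHER = "other"
--
-- ORDER_CATEGORY_SCOPE_MIXED = "mixed"
--
-- _UTILITY_PREFIXES = ("USA", "UTA", "ECOM", "HDEQ", "UTIL")
--
-- _UTILITY_EXACT = {"UTILITY", "UTILITIES"}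
--
-- def line_category_bucket(raw_value):
--     value = str(raw_value or "").strip().upper()
--     if not value:
--         return ORDER_CATEGORY_SCOPE_OTHER
--     if value in _UTILITY_EXACT or value.startswith(_UTILITY_PREFIXES):
--         return ORDER_CATEGORY_SCOPE_UTILITIES
--     if "CARGO" in value:
--         return ORDER_CATEGORY_SCOPE_CARGO
--     if "DUMP" in value:
--         return ORDER_CATEGORY_SCOPE_DUMP
--     return ORDER_CATEGORY_SCOPE_OTHER
--
-- def order_category_scope_from_tokens(category_tokens):
--     buckets = {
--         line_category_bucket(token)
--         for token in (category_tokens or [])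
--         if str(token or "").strip()
--     }
--     if not buckets:
--         return ORDER_CATEGORY_SCOPE_OTHER
--     if len(buckets) == 1:
--         return next(iter(buckets))
--     return ORDER_CATEGORY_SCOPE_MIXED
-- ===== SOURCE B (Python) =====
-- ORDER_CATEGORY_SCOPE_UTILITIES = "utilities"
-- ORDER_CATEGORY_SCOPE_DUMP = "dump"
-- ORDER_CATEGORY_SCOPE_CARGO = "cargo"
-- ORDER_CATEGORY_SCOPE_OTHER = "other"
-- ORDER_CATEGORY_SCOPE_MIXED = "mixed"
--
-- _UTILITY_PREFIXES = ("USA", "UTA", "ECOM", "HDEQ", "UTIL")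
-- _UTILITY_EXACT = {"UTILITY", "UTILITIES"}
--
--
-- def line_category_bucket(raw_value):
--     value = str(raw_value or "").strip().upper()
--     if not value:
--         return ORDER_CATEGORY_SCOPE_OTHER
--     if value in _UTILITY_EXACT or value.startswith(_UTILITY_PREFIXES):
--         return ORDER_CATEGORY_SCOPE_UTILITIES
--     if "CARGO" in value:
--         return ORDER_CATEGORY_SCOPE_CARGO
--     if "DUMP" in value:
--         return ORDER_CATEGORY_SCOPE_DUMP
--     return ORDER_CATEGORY_SCOPE_OTHER
--
--
-- def order_category_scope_from_tokens(category_tokens):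
--     seen = None
--     for token in (category_tokens or []):
--         if not str(token or "").strip():
--             continue
--         bucket = line_category_bucket(token)
--         if seen is None:
--             seen = bucket
--         elif bucket != seen:
--             return ORDER_CATEGORY_SCOPE_MIXED
--     return ORDER_CATEGORY_SCOPE_OTHER if seen is None else seen
-- ===== Notes on version B (the rewrite author's own statement) =====
-- stated objective: alternative
-- what changed: Replaces the build-full-set-then-count-its-size approach with a single early-exiting scan that keeps one scalar 'seen' bucket and returns 'mixed' as soon as a second distinct bucket appears.
import Mathlib
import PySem

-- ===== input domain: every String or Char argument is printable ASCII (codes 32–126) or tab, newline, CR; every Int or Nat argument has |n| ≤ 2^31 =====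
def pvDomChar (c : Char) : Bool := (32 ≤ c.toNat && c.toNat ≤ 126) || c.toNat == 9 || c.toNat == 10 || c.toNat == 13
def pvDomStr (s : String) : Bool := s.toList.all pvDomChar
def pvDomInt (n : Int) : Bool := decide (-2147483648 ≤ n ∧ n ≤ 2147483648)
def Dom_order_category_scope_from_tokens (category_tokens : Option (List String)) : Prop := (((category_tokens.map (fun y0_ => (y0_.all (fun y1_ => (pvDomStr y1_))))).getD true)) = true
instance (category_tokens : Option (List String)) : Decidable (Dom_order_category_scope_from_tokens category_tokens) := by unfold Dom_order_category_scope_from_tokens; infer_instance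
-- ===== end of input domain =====

-- ===== PORT A =====
-- B replaces A's build-the-whole-bucket-set-then-inspect-its-size with a single early-exit scan keeping one scalar bucket (objective: alternative).
def line_category_bucket (raw_value : String) : String :=
  let value := PySem.Str.upper (PySem.Str.strip raw_value)
  if PySem.Str.len value == 0 then "other"
  else if value == "UTILITY" || value == "UTILITIES"
      || PySem.Str.startswith value "USA" || PySem.Str.startswith value "UTA"
      || PySem.Str.startswith value "ECOM" || PySem.Str.startswith value "HDEQ"
      || PySem.Str.startswith value "UTIL" then "utilities"
  else if PySem.Str.isIn "CARGO" value then "cargo"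
  else if PySem.Str.isIn "DUMP" value then "dump"
  else "other"

def order_category_scope_from_tokens (category_tokens : Option (List String)) : String :=
  -- the set comprehension: fold over the tokens, adding the bucket of each token that strips nonempty
  let buckets : PySem.Set String :=
    (category_tokens.getD []).foldl
      (fun s tok => if PySem.Str.len (PySem.Str.strip tok) != 0
                    then PySem.Set.add s (line_category_bucket tok) else s)
      PySem.Set.empty
  match buckets with
  | [] => "other"          -- not buckets
  | [b] => b               -- len(buckets) == 1: its unique element
  | _ => "mixed"

-- ===== PORT B =====
def scopeLoop (seen : Option String) : List String → String
  | [] => match seen with | none => "other" | some b => b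
  | tok :: ts =>
    if PySem.Str.len (PySem.Str.strip tok) == 0 then scopeLoop seen ts
    else
      let bucket := line_category_bucket tok
      match seen with
      | none => scopeLoop (some bucket) ts
      | some s => if bucket == s then scopeLoop (some s) ts else "mixed"

def order_category_scope_from_tokens_alt (category_tokens : Option (List String)) : String :=
  scopeLoop none (category_tokens.getD [])

-- ===== PRECONDITION & SPEC =====
def Spec_order_category_scope_from_tokens (category_tokens : Option (List String)) (out : String) : Prop := out = order_category_scope_from_tokens_alt category_tokens
instance (category_tokens : Option (List String)) (out : String) : Decidable (Spec_order_category_scope_from_tokens category_tokens out) := by unfold Spec_order_category_scope_from_tokens; infer_instance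

-- ===== CLAIM (what is proved, stated in full; the proofs are below) =====
def Claim_equal_order_category_scope_from_tokens : Prop := ∀ (category_tokens : Option (List String)), Dom_order_category_scope_from_tokens category_tokens → Spec_order_category_scope_from_tokens category_tokens (order_category_scope_from_tokens category_tokens)

-- ===== LEMMAS AND PROOFS =====
def pvStep (s : PySem.Set String) (tok : String) : PySem.Set String :=
  if PySem.Str.len (PySem.Str.strip tok) != 0 then PySem.Set.add s (line_category_bucket tok) else s

def pvClassify : PySem.Set String → String
  | [] => "other"
  | [b] => b
  | _ => "mixed"

theorem pvClassify_big (ts : List String) (s : PySem.Set String) (h : 2 ≤ s.length) :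
    pvClassify (ts.foldl pvStep s) = "mixed" := by
  induction ts generalizing s with
  | nil =>
    match s, h with
    | _ :: _ :: _, _ => rfl
  | cons t ts ih =>
    simp only [List.foldl_cons]
    apply ih
    unfold pvStep
    split
    · rw [PySem.Set.add_eq_ite]
      split
      · exact h
      · simp; omega
    · exact h

theorem pvKey (ts : List String) (seen : Option String) :
    scopeLoop seen ts =
      pvClassify (ts.foldl pvStep (match seen with | none => [] | some b => [b])) := by
  induction ts generalizing seen with
  | nil => cases seen <;> rfl
  | cons t ts ih =>
    cases seen with
    | none =>
      by_cases hlen : PySem.Chars.strip t.toList = []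
      · simpa [scopeLoop, pvStep, hlen] using ih none
      · simpa [scopeLoop, pvStep, hlen, PySem.Set.add_of_not_mem]
          using ih (some (line_category_bucket t))
    | some s =>
      by_cases hlen : PySem.Chars.strip t.toList = []
      · simpa [scopeLoop, pvStep, hlen] using ih (some s)
      · by_cases hb : line_category_bucket t = s
        · have h1 : PySem.Set.add [s] (line_category_bucket t) = [s] :=
            PySem.Set.add_of_mem (by simp [hb])
          simpa [scopeLoop, pvStep, hlen, hb, h1] using ih (some s)
        · have h2 := pvClassify_big ts [s, line_category_bucket t] (by simp)
          simp [scopeLoop, pvStep, hlen, hb, h2, PySem.Set.add]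

-- ===== VERDICT (by name: the statement is the Claim_ definition above) =====
theorem order_category_scope_from_tokens_spec : Claim_equal_order_category_scope_from_tokens := by
  intro ct _
  unfold Spec_order_category_scope_from_tokens
  unfold order_category_scope_from_tokens order_category_scope_from_tokens_alt
  rw [pvKey]
  rfl
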